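-- pv_equiv track=rewrite | github.com/myaji35/15_CertiGraph | backend/app/services/parser/simple_pdf_parser.py | _remove_table_text_improved
-- ===== SOURCE A (Python) =====
-- from typing import List, Dict, Any, Optional
--
-- def _remove_table_text_improved(question_text: str, table: List[List[str]]) -> str:
--     """표 텍스트를 더 정확하게 제거"""
--     lines = question_text.split('\n')
--     cleaned_lines = []
--     skip_mode = False
--     skip_count = 0
--
--     for line in lines:
--         # 표의 각 셀이 현재 줄에 있는지 확인
--         line_contains_table_cell = False
--         for row in table:
--             for cell in row:
--                 if cell and len(cell) > 2:  # 짧은 텍스트는 제외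
--                     # 셀 내용이 줄에 포함되어 있으면
--                     if cell in line:
--                         line_contains_table_cell = True
--                         break
--             if line_contains_table_cell:
--                 break
--
--         if line_contains_table_cell:
--             skip_mode = True
--             skip_count = 0
--             continue
--
--         # 표 이후 몇 줄은 추가로 스킵 (표 관련 내용일 가능성)
--         if skip_mode:
--             skip_count += 1
--             if skip_count > 2 or line.strip() == '':  # 빈 줄이나 충분히 떨어진 경우
--                 skip_mode = False
--             else:
--                 continue
--
--         cleaned_lines.append(line)
--
--     return '\n'.join(cleaned_lines).strip()
-- ===== SOURCE B (Python) =====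
-- from typing import List
--
-- def _remove_table_text_improved(question_text: str, table: List[List[str]]) -> str:
--     # Staged, stateless approach: precompute per-line hit/blank flag arrays once, then
--     # decide each line independently with a pure lookback predicate on lines i-1 and i-2
--     # (no running skip state): drop a line iff it contains a usable cell, or it is
--     # non-blank and the previous line contained one, or the line two back contained one
--     # while the previous line was a non-blank non-hit line.
--     lines = question_text.split('\n')
--     patterns = [cell for row in table for cell in row if len(cell) > 2]
--     hit = [any(p in line for p in patterns) for line in lines]
--     blank = [line.strip() == '' for line in lines]
--
--     def dropped(i):
--         if hit[i]:
--             return True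
--         if blank[i]:
--             return False
--         if i >= 1 and hit[i - 1]:
--             return True
--         if i >= 2 and hit[i - 2] and not hit[i - 1] and not blank[i - 1]:
--             return True
--         return False
--
--     return '\n'.join(lines[i] for i in range(len(lines)) if not dropped(i)).strip()
-- ===== Notes on version B (the rewrite author's own statement) =====
-- stated objective: alternative
-- what changed: B replaces A's single stateful pass (skip_mode/skip_count machine over rows x cells per line) with staged passes: flatten-and-filter the usable cells once, precompute per-line hit/blank flag arrays, then decide each line independently with a pure lookback predicate on the flags of lines i-1 and i-2.
import Mathlib
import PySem

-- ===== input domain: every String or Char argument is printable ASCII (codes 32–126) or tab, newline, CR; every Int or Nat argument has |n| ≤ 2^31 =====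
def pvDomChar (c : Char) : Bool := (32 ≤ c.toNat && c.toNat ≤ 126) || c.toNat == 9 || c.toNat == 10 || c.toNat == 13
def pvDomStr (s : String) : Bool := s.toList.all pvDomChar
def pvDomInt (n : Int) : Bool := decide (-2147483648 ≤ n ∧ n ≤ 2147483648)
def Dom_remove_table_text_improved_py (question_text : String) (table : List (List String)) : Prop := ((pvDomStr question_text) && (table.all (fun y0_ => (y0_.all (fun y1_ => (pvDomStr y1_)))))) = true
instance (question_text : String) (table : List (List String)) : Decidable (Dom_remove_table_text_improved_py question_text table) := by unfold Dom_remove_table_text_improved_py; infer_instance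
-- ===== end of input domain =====

-- B replaces A's sequential skip_mode/skip_count state machine by two precomputed per-line
-- flag arrays and a stateless lookback predicate deciding each line independently
-- (objective: alternative decomposition, staged passes instead of one stateful pass).

-- ===== PORT A =====
-- one loop body of A: state = (cleaned_lines, skip_mode, skip_count)
def pvStepA (table : List (List String)) (st : List String × Bool × Int) (line : String) :
    List String × Bool × Int :=
  let cleaned := st.1
  let skip_mode := st.2.1
  let skip_count := st.2.2
  let line_contains_table_cell :=
    table.any (fun row => row.any (fun cell =>
      (cell ≠ "" && 2 < PySem.Str.len cell) && PySem.Str.isIn cell line))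
  if line_contains_table_cell then (cleaned, true, 0)
  else if skip_mode then
    let sc := skip_count + 1
    if 2 < sc || PySem.Str.strip line == "" then (cleaned ++ [line], false, sc)
    else (cleaned, true, sc)
  else (cleaned ++ [line], skip_mode, skip_count)

def remove_table_text_improved_py (question_text : String) (table : List (List String)) : String :=
  let lines := (PySem.Str.split? question_text "\n").getD []
  let st := lines.foldl (pvStepA table) ([], false, 0)
  PySem.Str.strip (PySem.Str.join "\n" st.1)

-- ===== PORT B =====
-- B's pure per-line decision: dropped(i), lookback over the precomputed flag lists
-- (Python indexes hit[i-1]/blank[i-1] only in range; getD with default false is exact there)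
def pvDropped (hit blank : List Bool) (i : Nat) : Bool :=
  if hit.getD i false then true
  else if blank.getD i false then false
  else if decide (1 ≤ i) && hit.getD (i - 1) false then true
  else if decide (2 ≤ i) && hit.getD (i - 2) false && !(hit.getD (i - 1) false)
        && !(blank.getD (i - 1) false) then true
  else false

def remove_table_text_improved_py_alt (question_text : String) (table : List (List String)) : String :=
  let lines := (PySem.Str.split? question_text "\n").getD []
  let patterns := (table.flatMap id).filter (fun cell => 2 < PySem.Str.len cell)
  let hit := lines.map (fun line => patterns.any (fun p => PySem.Str.isIn p line))
  let blank := lines.map (fun line => PySem.Str.strip line == "")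
  let kept := ((List.range lines.length).filter (fun i => !pvDropped hit blank i)).map
      (fun i => lines.getD i "")   -- lines[i], i always in range
  PySem.Str.strip (PySem.Str.join "\n" kept)

-- ===== PRECONDITION & SPEC =====
def Spec_remove_table_text_improved_py (question_text : String) (table : List (List String)) (out : String) : Prop := out = remove_table_text_improved_py_alt question_text table
instance (question_text : String) (table : List (List String)) (out : String) : Decidable (Spec_remove_table_text_improved_py question_text table out) := by unfold Spec_remove_table_text_improved_py; infer_instance

-- ===== CLAIM =====
def Claim_equal_remove_table_text_improved_py : Prop := ∀ (question_text : String) (table : List (List String)), Dom_remove_table_text_improved_py question_text table → Spec_remove_table_text_improved_py question_text table (remove_table_text_improved_py question_text table)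

-- ===== LEMMAS AND PROOFS =====

-- Per-line match tests agree: A's nested row/cell scan = B's scan of the filtered flat cell list.
lemma match_eq (table : List (List String)) (line : String) :
    (table.any (fun row => row.any (fun cell =>
      (cell ≠ "" && 2 < PySem.Str.len cell) && PySem.Str.isIn cell line)))
  = (((table.flatMap id).filter (fun cell => 2 < PySem.Str.len cell)).any
      (fun p => PySem.Str.isIn p line)) := by
  simp only [List.any_filter, List.any_flatMap, id]
  congr 1; funext row; congr 1; funext cell
  rcases h : (decide (2 < PySem.Str.len cell)) with _ | _
  · simp
  · have hne : (cell ≠ "") := by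
      intro he; subst he
      simp [PySem.Str.len] at h
    simp [hne]

-- dropped(i) with a virtual two-line history (m2,m1,b1) prepended to the lists
def pvDroppedH (m2 m1 b1 : Bool) (hs bs : List Bool) : Nat → Bool
  | 0 => hs.getD 0 false || (!(bs.getD 0 false) && (m1 || (m2 && !m1 && !b1)))
  | 1 => hs.getD 1 false || (!(bs.getD 1 false) &&
          (hs.getD 0 false || (m1 && !(hs.getD 0 false) && !(bs.getD 0 false))))
  | (i+2) => hs.getD (i+2) false || (!(bs.getD (i+2) false) &&
          (hs.getD (i+1) false || (hs.getD i false && !(hs.getD (i+1) false) && !(bs.getD (i+1) false))))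

lemma dropped_eq_H (hs bs : List Bool) (i : Nat) :
    pvDropped hs bs i = pvDroppedH false false false hs bs i := by
  match i with
  | 0 =>
    simp only [pvDropped, pvDroppedH]
    rcases hs.getD 0 false with _ | _ <;> rcases bs.getD 0 false with _ | _ <;> simp
  | 1 =>
    simp only [pvDropped, pvDroppedH]
    rcases hs.getD 1 false with _ | _ <;> rcases bs.getD 1 false with _ | _ <;>
      rcases hs.getD 0 false with _ | _ <;> simp
  | (i+2) =>
    simp only [pvDropped, pvDroppedH, show i + 2 - 1 = i + 1 from rfl, show i + 2 - 2 = i from rfl]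
    rcases hs.getD (i+2) false with _ | _ <;> rcases bs.getD (i+2) false with _ | _ <;>
      rcases hs.getD (i+1) false with _ | _ <;> rcases bs.getD (i+1) false with _ | _ <;>
      rcases hs.getD i false with _ | _ <;> simp

lemma droppedH_shift (m2 m1 b1 x y : Bool) (hs bs : List Bool) (i : Nat) :
    pvDroppedH m2 m1 b1 (x :: hs) (y :: bs) (i + 1) = pvDroppedH m1 x y hs bs i := by
  match i with
  | 0 => simp [pvDroppedH, List.getD]
  | 1 => simp [pvDroppedH, List.getD]
  | (i+2) => simp [pvDroppedH, List.getD]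

-- index-free specification of B's kept lines, seeded with the virtual history
def pvG (fh fb : String → Bool) (m2 m1 b1 : Bool) : List String → List String
  | [] => []
  | l :: rest =>
    let m := fh l
    let b := fb l
    let tail := pvG fh fb m1 m b rest
    if m || (!b && (m1 || (m2 && !m1 && !b1))) then tail else l :: tail

def pvKept (ls : List String) (D : Nat → Bool) : List String :=
  ((List.range ls.length).filter (fun i => !D i)).map (fun i => ls.getD i "")

lemma pvKept_cons (l : String) (ls : List String) (D : Nat → Bool) :
    pvKept (l :: ls) D = (if D 0 then [] else [l]) ++ pvKept ls (fun i => D (i + 1)) := by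
  simp only [pvKept, List.length_cons, List.range_succ_eq_map, List.filter_cons]
  rcases hD : D 0 with _ | _ <;>
    simp [List.filter_map, List.map_map, Function.comp_def, List.getD]

lemma kept_eq_G (fh fb : String → Bool) :
    ∀ (ls : List String) (m2 m1 b1 : Bool),
    pvKept ls (pvDroppedH m2 m1 b1 (ls.map fh) (ls.map fb)) = pvG fh fb m2 m1 b1 ls := by
  intro ls
  induction ls with
  | nil => intro m2 m1 b1; rfl
  | cons l rest ih =>
    intro m2 m1 b1
    rw [List.map_cons, List.map_cons, pvKept_cons]
    have hshift : (fun i => pvDroppedH m2 m1 b1 (fh l :: rest.map fh) (fb l :: rest.map fb) (i + 1))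
        = pvDroppedH m1 (fh l) (fb l) (rest.map fh) (rest.map fb) := by
      funext i; exact droppedH_shift m2 m1 b1 (fh l) (fb l) _ _ i
    rw [hshift, ih m1 (fh l) (fb l)]
    have h0 : pvDroppedH m2 m1 b1 (fh l :: rest.map fh) (fb l :: rest.map fb) 0
        = (fh l || (!(fb l) && (m1 || (m2 && !m1 && !b1)))) := by
      simp [pvDroppedH, List.getD]
    rw [h0]
    show _ = pvG fh fb m2 m1 b1 (l :: rest)
    simp only [pvG]
    rcases fh l || (!(fb l) && (m1 || (m2 && !m1 && !b1))) with _ | _ <;> simp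

-- A's fold equals pvG under the skip-state/lookback-flag correspondence
lemma fold_eq_G (table : List (List String)) :
    ∀ (lines : List String) (acc : List String) (mode : Bool) (count : Int) (m2 m1 b1 : Bool),
    m1 = (mode && decide (count = 0)) →
    (mode && decide (count = 1)) = (m2 && !m1 && !b1) →
    (mode = true → 0 ≤ count) →
    (lines.foldl (pvStepA table) (acc, mode, count)).1
      = acc ++ pvG (fun line => table.any (fun row => row.any (fun cell =>
          (cell ≠ "" && 2 < PySem.Str.len cell) && PySem.Str.isIn cell line)))
          (fun line => PySem.Str.strip line == "") m2 m1 b1 lines := by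
  intro lines
  induction lines with
  | nil => intro acc mode count m2 m1 b1 _ _ _; simp [pvG]
  | cons line rest ih =>
    intro acc mode count m2 m1 b1 hm1 hw hnn
    simp only [List.foldl_cons, pvG]
    set m := table.any (fun row => row.any (fun cell =>
      (cell ≠ "" && 2 < PySem.Str.len cell) && PySem.Str.isIn cell line)) with hmdef
    set b := (PySem.Str.strip line == "") with hbdef
    rw [show pvStepA table (acc, mode, count) line
        = (if m then (acc, true, 0)
          else if mode then
            if 2 < count + 1 || b then (acc ++ [line], false, count + 1)
            else (acc, true, count + 1)
          else (acc ++ [line], mode, count)) from rfl]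
    by_cases hmatch : m = true
    · simp only [hmatch, if_true, Bool.true_or]
      exact ih acc true 0 m1 true b (by simp) (by simp) (by intro _; omega)
    · simp only [Bool.not_eq_true] at hmatch
      simp only [hmatch, Bool.false_eq_true, if_false, Bool.false_or]
      by_cases hmode : mode = true
      · subst hmode
        have hc0 : 0 ≤ count := hnn rfl
        rw [if_pos (rfl : (true : Bool) = true)]
        simp only [Bool.true_and] at hm1 hw
        by_cases hb : b = true
        · -- blank line: A closes the window and keeps it; B keeps it (blank test)
          have hkeep : (decide (2 < count + 1) || b) = true := by simp [hb]
          rw [if_pos hkeep, if_neg (by simp [hb])]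
          rw [ih (acc ++ [line]) false (count + 1) m1 false b (by simp)
            (by simp [hb]) (by simp)]
          simp
        · simp only [Bool.not_eq_true] at hb
          by_cases hcnt : 2 < count + 1
          · -- window exhausted: A keeps and leaves skip mode; B keeps (no recent hit)
            have h1 : m1 = false := by rw [hm1]; simp; omega
            have hcount1 : decide (count = 1) = false := by simp; omega
            have h2 : (m2 && !m1 && !b1) = false := hw.symm.trans hcount1
            rw [if_pos (show (decide (2 < count + 1) || b) = true by simp [hcnt]),
              if_neg (by rw [h2, h1]; simp)]
            rw [ih (acc ++ [line]) false (count + 1) m1 false b (by simp)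
              (by simp [h1]) (by simp)]
            simp
          · -- inside the window: A drops; B drops (hit one or two lines back)
            have hcond : (!b && (m1 || (m2 && !m1 && !b1))) = true := by
              rw [hb, ← hw, hm1]
              simp only [Bool.not_false, Bool.true_and, Bool.or_eq_true,
                decide_eq_true_eq]
              omega
            rw [if_neg (show ¬ (decide (2 < count + 1) || b) = true by simp [hcnt, hb]),
              if_pos hcond]
            exact ih acc true (count + 1) m1 false b
              (by simp; omega)
              (by simp only [hb, Bool.not_false, Bool.and_true, Bool.true_and, hm1,
                    decide_eq_decide]
                  omega)
              (by intro _; omega)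
      · -- not in skip mode: both keep the line
        simp only [Bool.not_eq_true] at hmode
        subst hmode
        simp only [Bool.false_eq_true, if_false]
        have h1 : m1 = false := by simpa using hm1
        have h2 : (m2 && !m1 && !b1) = false := by rw [← hw]; simp
        rw [h1] at h2 ⊢
        simp only [h2, Bool.or_false, Bool.and_false, Bool.false_eq_true, if_false]
        rw [ih (acc ++ [line]) false count false false b (by simp) (by simp) (by simp)]
        simp
-- ===== VERDICT =====
theorem remove_table_text_improved_py_spec : Claim_equal_remove_table_text_improved_py := by
  intro question_text table _
  unfold Spec_remove_table_text_improved_py remove_table_text_improved_py remove_table_text_improved_py_alt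
  simp only []
  set lines := (PySem.Str.split? question_text "\n").getD [] with hlines
  have hB : ((List.range lines.length).filter (fun i => !pvDropped
        (lines.map (fun line => (((table.flatMap id).filter (fun cell => 2 < PySem.Str.len cell))).any (fun p => PySem.Str.isIn p line)))
        (lines.map (fun line => PySem.Str.strip line == "")) i)).map (fun i => lines.getD i "")
      = pvG (fun line => (((table.flatMap id).filter (fun cell => 2 < PySem.Str.len cell))).any (fun p => PySem.Str.isIn p line))
          (fun line => PySem.Str.strip line == "") false false false lines := by
    rw [← kept_eq_G]
    unfold pvKept
    congr 1
    apply List.filter_congr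
    intro i _
    rw [dropped_eq_H]
  have hfh : (fun line => table.any (fun row => row.any (fun cell =>
        (cell ≠ "" && 2 < PySem.Str.len cell) && PySem.Str.isIn cell line)))
      = (fun line => (((table.flatMap id).filter (fun cell => 2 < PySem.Str.len cell))).any
          (fun p => PySem.Str.isIn p line)) := by
    funext line; exact match_eq table line
  rw [fold_eq_G table lines [] false 0 false false false (by simp) (by simp) (by simp), hfh, ← hB]
  simp
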